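-- pv_equiv track=rewrite | github.com/archangel2006/DSA-Vault | GFG/CompanySpecific/Basic/FindTheFine.py | totalFine
-- ===== SOURCE A (Python) =====
-- def totalFine(date, car, fine):
--
--     tot=0
--
--     if date%2==0:
--         for i in range(len(car)):
--             if car[i]%2!=0:
--                 tot+=fine[i]
--     if date%2!=0:
--         for i in range(len(car)):
--             if car[i]%2==0:
--                 tot+=fine[i]
--
--     return tot
-- ===== SOURCE B (Python) =====
-- def totalFine(date, car, fine):
--     # complement decomposition: total of all fines paired with a car,
--     # minus the fines of cars with the SAME parity as the date
--     total = sum(fine[:len(car)])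
--     same = sum(f for c, f in zip(car, fine) if (c - date) % 2 == 0)
--     return total - same
-- ===== Notes on version B (the rewrite author's own statement) =====
-- stated objective: alternative
-- what changed: Replaces A's branch-on-date-parity conditional accumulation loop by a complement computation: sum all fines paired with a car, then subtract the same-parity fines in a second pass, with no conditional accumulator.
import Mathlib
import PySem

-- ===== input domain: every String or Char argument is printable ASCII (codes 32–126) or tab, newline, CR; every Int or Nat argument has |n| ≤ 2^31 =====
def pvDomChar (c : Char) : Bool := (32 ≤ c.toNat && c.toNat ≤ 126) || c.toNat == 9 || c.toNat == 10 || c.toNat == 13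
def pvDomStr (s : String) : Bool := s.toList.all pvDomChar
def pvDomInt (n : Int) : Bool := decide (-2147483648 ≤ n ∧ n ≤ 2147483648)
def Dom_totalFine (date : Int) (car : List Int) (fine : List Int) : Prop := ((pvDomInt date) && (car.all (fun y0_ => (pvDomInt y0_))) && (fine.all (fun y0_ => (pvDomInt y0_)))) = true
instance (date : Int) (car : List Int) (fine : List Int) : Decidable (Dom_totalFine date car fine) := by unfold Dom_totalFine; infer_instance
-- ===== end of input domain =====

-- B replaces A's conditional accumulation loop (branch on date parity, then scan)
-- by a complement computation: total of all paired fines minus the same-parity fines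
-- (objective: alternative decomposition, same cost).

-- ===== PORT A =====
def totalFine (date : Int) (car : List Int) (fine : List Int) : Int :=
  let tot : Int := 0
  let tot :=
    if PySem.Int.mod date 2 = 0 then
      (PySem.List.pyRange 0 (car.length : Int) 1).foldl
        (fun tot i =>
          if PySem.Int.mod (PySem.List.pyGetD car i 0) 2 ≠ 0
          then tot + PySem.List.pyGetD fine i 0 else tot) tot
    else tot
  let tot :=
    if PySem.Int.mod date 2 ≠ 0 then
      (PySem.List.pyRange 0 (car.length : Int) 1).foldl
        (fun tot i =>
          if PySem.Int.mod (PySem.List.pyGetD car i 0) 2 = 0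
          then tot + PySem.List.pyGetD fine i 0 else tot) tot
    else tot
  tot

-- ===== PORT B =====
def totalFine_alt (date : Int) (car : List Int) (fine : List Int) : Int :=
  let total := (PySem.List.slice fine none (some (car.length : Int))).sum
  let same :=
    (((car.zip fine).filter
        (fun cf => PySem.Int.mod (cf.1 - date) 2 == 0)).map Prod.snd).sum
  total - same

-- ===== PRECONDITION & SPEC =====
-- Pre_ excludes exactly the inputs where A raises IndexError: a car of the opposite
-- parity to date at an index ≥ len(fine) makes A evaluate fine[i] out of range.
def Pre_totalFine (date : Int) (car : List Int) (fine : List Int) : Prop :=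
  ∀ c ∈ car.drop fine.length, PySem.Int.mod c 2 = PySem.Int.mod date 2
instance (date : Int) (car : List Int) (fine : List Int) : Decidable (Pre_totalFine date car fine) := by unfold Pre_totalFine; infer_instance
def pvWitness_totalFine : Int × List Int × List Int := (4, [1, 2, 3], [10, 20, 30])

def Spec_totalFine (date : Int) (car : List Int) (fine : List Int) (out : Int) : Prop := out = totalFine_alt date car fine
instance (date : Int) (car : List Int) (fine : List Int) (out : Int) : Decidable (Spec_totalFine date car fine out) := by unfold Spec_totalFine; infer_instance

-- ===== CLAIM (what is proved, stated in full; the proofs are below) =====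
def Claim_equal_totalFine : Prop := ∀ (date : Int) (car : List Int) (fine : List Int), Dom_totalFine date car fine → Pre_totalFine date car fine → Spec_totalFine date car fine (totalFine date car fine)

-- ===== LEMMAS AND PROOFS =====

-- A's index loop over range(len(car)) equals a fold over zip(car, fine):
-- beyond fine's length the loop body adds the default 0, so no length hypothesis is needed.
lemma rangeFold_eq_zipFold (p : Int → Prop) [DecidablePred p] :
    ∀ (car fine : List Int) (acc : Int),
      (List.range car.length).foldl
        (fun tot k => if p (car.getD k 0) then tot + fine.getD k 0 else tot) acc
      = (car.zip fine).foldl (fun tot cf => if p cf.1 then tot + cf.2 else tot) acc := by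
  intro car
  induction car with
  | nil => intro fine acc; simp
  | cons c cs ih =>
    intro fine acc
    cases fine with
    | nil =>
      simp only [List.zip_nil_right, List.foldl_nil, List.length_cons,
        List.range_succ_eq_map, List.foldl_cons, List.foldl_map,
        List.getD_nil, add_zero, ite_self]
      have : ∀ (l : List ℕ) (a : Int), l.foldl (fun tot (_ : ℕ) => tot) a = a := by
        intro l; induction l with
        | nil => intro a; rfl
        | cons x xs ihx => intro a; simp [List.foldl_cons, ihx]
      exact this _ _
    | cons f fs =>
      simp only [List.length_cons, List.range_succ_eq_map, List.foldl_cons, List.foldl_map,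
        List.zip_cons_cons, List.getD_cons_zero, List.getD_cons_succ]
      exact ih fs _

-- A's pyRange/pyGetD loop reduces to the Nat-range/getD loop of the previous lemma.
lemma pyLoop_eq_zipFold (p : Int → Prop) [DecidablePred p]
    (car fine : List Int) (acc : Int) :
    (PySem.List.pyRange 0 (car.length : Int) 1).foldl
      (fun tot i => if p (PySem.List.pyGetD car i 0) then tot + PySem.List.pyGetD fine i 0 else tot) acc
    = (car.zip fine).foldl (fun tot cf => if p cf.1 then tot + cf.2 else tot) acc := by
  rw [PySem.List.pyRange_one]
  simp only [List.foldl_map, zero_add, sub_zero, Int.toNat_natCast,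
    PySem.List.pyGetD_natCast]
  exact rangeFold_eq_zipFold p car fine acc

-- snd-projection of zip is the truncated second list (B's fine[:len(car)]).
lemma map_snd_zip_eq_take :
    ∀ (car fine : List Int), (car.zip fine).map Prod.snd = fine.take car.length := by
  intro car
  induction car with
  | nil => intro fine; simp
  | cons c cs ih =>
    intro fine
    cases fine with
    | nil => simp
    | cons f fs => simp [ih fs]

-- conditional accumulation = total minus the complement (B's subtraction scheme).
lemma fold_eq_sum_sub_filter (p : Int → Prop) [DecidablePred p]
    (g : Int × Int → Bool) (hg : ∀ cf, g cf = true ↔ ¬ p cf.1) :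
    ∀ (l : List (Int × Int)) (a : Int),
      l.foldl (fun tot cf => if p cf.1 then tot + cf.2 else tot) a
      = a + (l.map Prod.snd).sum - ((l.filter g).map Prod.snd).sum := by
  intro l
  induction l with
  | nil => intro a; simp
  | cons cf l ih =>
    intro a
    by_cases hp : p cf.1
    · have hgf : g cf = false := by
        rw [Bool.eq_false_iff]; intro h; exact (hg cf).mp h hp
      simp only [List.foldl_cons, if_pos hp, List.filter_cons, hgf, List.map_cons,
        List.sum_cons, Bool.false_eq_true, if_false, ih]
      ring
    · have hgt : g cf = true := (hg cf).mpr hp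
      simp only [List.foldl_cons, if_neg hp, List.filter_cons, hgt, List.map_cons,
        List.sum_cons, if_true, ih]
      ring


-- ===== VERDICT (by name: the statement is the Claim_ definition above) =====
theorem totalFine_spec : Claim_equal_totalFine := by
  intro date car fine _ _
  have hm : ∀ x : Int, PySem.Int.mod x 2 = x % 2 :=
    fun x => PySem.Int.mod_eq_emod_of_pos (by norm_num)
  unfold Spec_totalFine totalFine totalFine_alt
  simp only [hm]
  rw [PySem.List.slice_to_natCast, ← map_snd_zip_eq_take]
  by_cases hd : date % 2 = 0
  · simp only [hd, if_true, ne_eq, not_true_eq_false, if_false]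
    rw [pyLoop_eq_zipFold (fun x => ¬ x % 2 = 0) car fine 0,
        fold_eq_sum_sub_filter (fun x => ¬ x % 2 = 0)
          (fun cf => (cf.1 - date) % 2 == 0)
          (by intro cf; simp only [beq_iff_eq, not_not]; omega)]
    ring
  · simp only [hd, if_false, ne_eq, not_false_eq_true, if_true]
    rw [pyLoop_eq_zipFold (fun x => x % 2 = 0) car fine 0,
        fold_eq_sum_sub_filter (fun x => x % 2 = 0)
          (fun cf => (cf.1 - date) % 2 == 0)
          (by intro cf; simp only [beq_iff_eq]; omega)]
    ring
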